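-- pv_equiv track=rewrite | github.com/huggingface/transformers | utils/check_modeling_structure.py | _inherits_pretrained_model
-- ===== SOURCE A (Python) =====
-- def _simple_name(name: str) -> str:
--     return name.split(".")[-1]
--
-- def _inherits_pretrained_model(
--     class_name: str, class_to_bases: dict[str, list[str]], visiting: set[str] | None = None
-- ) -> bool:
--     if visiting is None:
--         visiting = set()
--     if class_name in visiting:
--         return False
--     visiting.add(class_name)
--
--     for base_name in class_to_bases.get(class_name, []):
--         simple_base_name = _simple_name(base_name)
--         if simple_base_name.endswith("PreTrainedModel"):
--             return True
--         if simple_base_name in class_to_bases and _inherits_pretrained_model(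
--             simple_base_name, class_to_bases, visiting
--         ):
--             return True
--     return False
-- ===== SOURCE B (Python) =====
-- def _inherits_pretrained_model(
--     class_name: str, class_to_bases: dict[str, list[str]], visiting: set[str] | None = None
-- ) -> bool:
--     if visiting is None:
--         visiting = set()
--     if class_name in visiting:
--         return False
--     visiting.add(class_name)
--     stack = [iter(class_to_bases.get(class_name, ()))]
--     while stack:
--         base_name = next(stack[-1], None)
--         if base_name is None:
--             stack.pop()
--             continue
--         simple_base_name = base_name.split(".")[-1]
--         if simple_base_name.endswith("PreTrainedModel"):
--             return True
--         if simple_base_name in class_to_bases and simple_base_name not in visiting: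
--             visiting.add(simple_base_name)
--             stack.append(iter(class_to_bases[simple_base_name]))
--     return False
-- ===== Notes on version B (the rewrite author's own statement) =====
-- stated objective: alternative
-- what changed: The recursive DFS is replaced by an iterative DFS over an explicit stack of base-name iterators, with the visited check hoisted to the push site; same visiting mutation order, same result.
import Mathlib
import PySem

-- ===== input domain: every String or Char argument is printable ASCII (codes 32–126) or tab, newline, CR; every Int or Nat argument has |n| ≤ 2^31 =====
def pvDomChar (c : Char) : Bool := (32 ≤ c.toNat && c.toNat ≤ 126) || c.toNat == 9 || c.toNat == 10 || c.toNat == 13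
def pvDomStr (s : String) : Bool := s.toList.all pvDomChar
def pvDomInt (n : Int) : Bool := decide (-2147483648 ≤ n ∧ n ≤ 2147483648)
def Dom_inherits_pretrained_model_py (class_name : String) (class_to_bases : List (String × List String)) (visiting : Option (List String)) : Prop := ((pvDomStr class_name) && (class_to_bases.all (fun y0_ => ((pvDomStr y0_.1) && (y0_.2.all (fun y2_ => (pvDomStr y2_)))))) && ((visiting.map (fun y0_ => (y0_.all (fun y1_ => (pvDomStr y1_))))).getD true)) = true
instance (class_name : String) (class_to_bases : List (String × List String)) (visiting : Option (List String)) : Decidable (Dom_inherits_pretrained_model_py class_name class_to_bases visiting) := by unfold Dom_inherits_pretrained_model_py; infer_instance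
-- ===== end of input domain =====

-- B rewrites A's recursive DFS as an iterative DFS over an explicit stack of base-name iterators
-- (visited check hoisted to the push site); same return value. Both Pythons mutate the caller's
-- `visiting` set identically; the theorems here are about the return value.

-- ===== PORT A =====

-- _simple_name: name.split(".")[-1]; splitting on the nonempty separator "." always yields
-- some nonempty list, so neither the .getD nor the getLastD default is ever used.
def simpleNamePy (name : String) : String :=
  ((PySem.Str.split? name ".").getD [name]).getLastD name

-- A's recursion, fuel-guarded only to make it total: class_to_bases.length + 2 nesting levels
-- always suffice for the Python, which adds a fresh name to `visiting` at every guarded level.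
mutual
def goA (ctb : List (String × List String)) (n : Nat) (cn : String) (v : PySem.Set String) :
    Bool × PySem.Set String :=
  match n with
  | 0 => (false, v)
  | Nat.succ m =>
    if PySem.Set.contains v cn then (false, v)
    else loopA ctb m (PySem.Dict.getD (PySem.Dict.mk ctb) cn []) (PySem.Set.add v cn)
termination_by (n, 0, 0)

def loopA (ctb : List (String × List String)) (n : Nat) (bases : List String) (v : PySem.Set String) :
    Bool × PySem.Set String :=
  match bases with
  | [] => (false, v)
  | b :: bs =>
    if PySem.Str.endswith (simpleNamePy b) "PreTrainedModel" then (true, v)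
    else if PySem.Dict.contains (PySem.Dict.mk ctb) (simpleNamePy b) then
      match goA ctb n (simpleNamePy b) v with
      | (true, v') => (true, v')
      | (false, v') => loopA ctb n bs v'
    else loopA ctb n bs v
termination_by (n, 1, bases.length)
end

def inherits_pretrained_model_py (class_name : String) (class_to_bases : List (String × List String)) (visiting : Option (List String)) : Bool :=
  (goA class_to_bases (class_to_bases.length + 2) class_name (visiting.getD [])).1

-- ===== PORT B =====

-- number of entries of class_to_bases whose key is not yet visited: the measure B's pushes decrease
def keyCount (ctb : List (String × List String)) (v : PySem.Set String) : Nat :=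
  (ctb.filter (fun p => decide (p.1 ∉ v))).length

lemma keyCount_mono (ctb : List (String × List String)) (v v' : PySem.Set String)
    (h : ∀ k, k ∈ v → k ∈ v') : keyCount ctb v' ≤ keyCount ctb v := by
  unfold keyCount
  rw [← List.countP_eq_length_filter, ← List.countP_eq_length_filter]
  apply List.countP_mono_left
  intro a _ ha
  simp only [decide_eq_true_eq] at ha ⊢
  exact fun hmem => ha (h a.1 hmem)

lemma keyCount_add_le (ctb : List (String × List String)) (v : PySem.Set String) (x : String) :
    keyCount ctb (PySem.Set.add v x) ≤ keyCount ctb v :=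
  keyCount_mono ctb v (PySem.Set.add v x) (fun k hk => (PySem.Set.mem_add v x k).mpr (Or.inl hk))

lemma keyCount_add_lt (ctb : List (String × List String)) (v : PySem.Set String) (x : String)
    (hx : ∃ p ∈ ctb, p.1 = x) (hv : x ∉ v) :
    keyCount ctb (PySem.Set.add v x) < keyCount ctb v := by
  induction ctb with
  | nil => rcases hx with ⟨p, hp, _⟩; cases hp
  | cons p ps ih =>
    unfold keyCount
    simp only [List.filter_cons]
    by_cases hpx : p.1 = x
    · have c1 : ¬ (decide (p.1 ∉ PySem.Set.add v x) = true) := by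
        simp [PySem.Set.mem_add, hpx]
      have c2 : decide (p.1 ∉ v) = true := by
        simp only [decide_eq_true_eq, hpx]; exact hv
      rw [if_neg c1, if_pos c2]
      have hle := keyCount_add_le ps v x
      simp only [keyCount] at hle
      simp only [List.length_cons]
      omega
    · have hx' : ∃ q ∈ ps, q.1 = x := by
        rcases hx with ⟨q, hq, hqx⟩
        rcases List.mem_cons.mp hq with rfl | hq'
        · exact absurd hqx hpx
        · exact ⟨q, hq', hqx⟩
      have hlt := ih hx'
      simp only [keyCount] at hlt
      have c : decide (p.1 ∉ PySem.Set.add v x) = decide (p.1 ∉ v) := by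
        apply decide_eq_decide.mpr
        constructor
        · exact fun hnot hmem => hnot ((PySem.Set.mem_add v x p.1).mpr (Or.inl hmem))
        · intro hnot hmem
          rcases (PySem.Set.mem_add v x p.1).mp hmem with hm | he
          · exact hnot hm
          · exact hpx he
      rw [c]
      split_ifs
      · simp only [List.length_cons]; omega
      · omega

lemma dictContains_exists (ctb : List (String × List String)) (x : String)
    (h : PySem.Dict.contains (PySem.Dict.mk ctb) x = true) : ∃ p ∈ ctb, p.1 = x := by
  rw [PySem.Dict.contains_mk] at h
  simpa using h

-- B's iterative DFS: a stack of the not-yet-consumed suffixes of each node's base list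
-- (the Python's iterators).
def runB (ctb : List (String × List String)) (stack : List (List String)) (v : PySem.Set String) :
    Bool × PySem.Set String :=
  match stack with
  | [] => (false, v)
  | [] :: rest => runB ctb rest v
  | (b :: bs) :: rest =>
    if PySem.Str.endswith (simpleNamePy b) "PreTrainedModel" then (true, v)
    else if PySem.Dict.contains (PySem.Dict.mk ctb) (simpleNamePy b)
        && !(PySem.Set.contains v (simpleNamePy b)) then
      runB ctb (PySem.Dict.getD (PySem.Dict.mk ctb) (simpleNamePy b) [] :: bs :: rest)
        (PySem.Set.add v (simpleNamePy b))
    else runB ctb (bs :: rest) v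
termination_by (keyCount ctb v, (stack.map (fun f => f.length + 1)).sum)
decreasing_by
  · apply Prod.Lex.right
    simp only [List.map_cons, List.sum_cons, List.length_nil]
    omega
  · apply Prod.Lex.left
    rename_i h
    rw [Bool.and_eq_true] at h
    exact keyCount_add_lt ctb v _ (dictContains_exists ctb _ h.1)
      (by simpa [PySem.Set.contains] using h.2)
  · apply Prod.Lex.right
    simp only [List.map_cons, List.sum_cons, List.length_cons]
    omega

def inherits_pretrained_model_py_alt (class_name : String) (class_to_bases : List (String × List String)) (visiting : Option (List String)) : Bool :=
  if PySem.Set.contains (visiting.getD []) class_name then false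
  else
    (runB class_to_bases [PySem.Dict.getD (PySem.Dict.mk class_to_bases) class_name []]
      (PySem.Set.add (visiting.getD []) class_name)).1

-- ===== PRECONDITION & SPEC =====
def Spec_inherits_pretrained_model_py (class_name : String) (class_to_bases : List (String × List String)) (visiting : Option (List String)) (out : Bool) : Prop := out = inherits_pretrained_model_py_alt class_name class_to_bases visiting
instance (class_name : String) (class_to_bases : List (String × List String)) (visiting : Option (List String)) (out : Bool) : Decidable (Spec_inherits_pretrained_model_py class_name class_to_bases visiting out) := by unfold Spec_inherits_pretrained_model_py; infer_instance

-- ===== CLAIM (what is proved, stated in full; the proofs are below) =====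
def Claim_equal_inherits_pretrained_model_py : Prop := ∀ (class_name : String) (class_to_bases : List (String × List String)) (visiting : Option (List String)), Dom_inherits_pretrained_model_py class_name class_to_bases visiting → Spec_inherits_pretrained_model_py class_name class_to_bases visiting (inherits_pretrained_model_py class_name class_to_bases visiting)

-- ===== LEMMAS AND PROOFS =====

lemma goA_visited (ctb : List (String × List String)) (n : Nat) (cn : String) (v : PySem.Set String)
    (h : PySem.Set.contains v cn = true) : goA ctb n cn v = (false, v) := by
  cases n with
  | zero => simp only [goA]
  | succ m => simp only [goA]; rw [if_pos h]

-- the visiting set only grows through A's loop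
lemma loopA_mem (ctb : List (String × List String)) :
    ∀ (n : Nat) (bases : List String) (v : PySem.Set String) (y : String),
      y ∈ v → y ∈ (loopA ctb n bases v).2 := by
  intro n
  induction n with
  | zero =>
    intro bases
    induction bases with
    | nil => intro v y hy; simpa only [loopA] using hy
    | cons b bs ih =>
      intro v y hy
      simp only [loopA]
      by_cases he : PySem.Str.endswith (simpleNamePy b) "PreTrainedModel" = true
      · rw [if_pos he]; exact hy
      · rw [if_neg he]
        by_cases hk : PySem.Dict.contains (PySem.Dict.mk ctb) (simpleNamePy b) = true
        · rw [if_pos hk]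
          simp only [goA]
          exact ih v y hy
        · rw [if_neg hk]; exact ih v y hy
  | succ m ihm =>
    intro bases
    induction bases with
    | nil => intro v y hy; simpa only [loopA] using hy
    | cons b bs ih =>
      intro v y hy
      simp only [loopA]
      by_cases he : PySem.Str.endswith (simpleNamePy b) "PreTrainedModel" = true
      · rw [if_pos he]; exact hy
      · rw [if_neg he]
        by_cases hk : PySem.Dict.contains (PySem.Dict.mk ctb) (simpleNamePy b) = true
        · rw [if_pos hk]
          by_cases hv : PySem.Set.contains v (simpleNamePy b) = true
          · rw [goA_visited ctb (m + 1) _ v hv]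
            exact ih v y hy
          · have hgo : goA ctb (m + 1) (simpleNamePy b) v
                = loopA ctb m (PySem.Dict.getD (PySem.Dict.mk ctb) (simpleNamePy b) [])
                    (PySem.Set.add v (simpleNamePy b)) := by
              simp only [goA]; rw [if_neg hv]
            rw [hgo]
            have hy' : y ∈ PySem.Set.add v (simpleNamePy b) :=
              (PySem.Set.mem_add v (simpleNamePy b) y).mpr (Or.inl hy)
            have h1 := ihm (PySem.Dict.getD (PySem.Dict.mk ctb) (simpleNamePy b) [])
              (PySem.Set.add v (simpleNamePy b)) y hy'
            rcases hres : loopA ctb m (PySem.Dict.getD (PySem.Dict.mk ctb) (simpleNamePy b) [])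
                (PySem.Set.add v (simpleNamePy b)) with ⟨br, v'⟩
            rw [hres] at h1
            cases br
            · exact ih v' y h1
            · exact h1
        · rw [if_neg hk]; exact ih v y hy

-- the simulation: B's stack machine on (bases :: stack) runs A's loop on bases, then the rest
lemma simBA (ctb : List (String × List String)) :
    ∀ (n : Nat) (bases : List String) (stack : List (List String)) (v : PySem.Set String),
      keyCount ctb v ≤ n →
      runB ctb (bases :: stack) v =
        (match loopA ctb n bases v with
         | (true, v') => (true, v')
         | (false, v') => runB ctb stack v') := by
  intro n
  induction n with
  | zero =>
    intro bases
    induction bases with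
    | nil => intro stack v _; simp only [runB, loopA]
    | cons b bs ih =>
      intro stack v h
      simp only [runB, loopA]
      by_cases he : PySem.Str.endswith (simpleNamePy b) "PreTrainedModel" = true
      · rw [if_pos he, if_pos he]
      · rw [if_neg he, if_neg he]
        by_cases hk : PySem.Dict.contains (PySem.Dict.mk ctb) (simpleNamePy b) = true
        · rw [if_pos hk]
          by_cases hv : PySem.Set.contains v (simpleNamePy b) = true
          · have hvm : simpleNamePy b ∈ v := by simpa [PySem.Set.contains] using hv
            have hcondf : ¬ ((PySem.Dict.contains (PySem.Dict.mk ctb) (simpleNamePy b)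
                && !(PySem.Set.contains v (simpleNamePy b))) = true) := by
              simp [hvm]
            rw [if_neg hcondf, goA_visited ctb 0 _ v hv]
            exact ih stack v h
          · exfalso
            have hlt := keyCount_add_lt ctb v (simpleNamePy b)
              (dictContains_exists ctb _ hk) (by simpa [PySem.Set.contains] using hv)
            omega
        · rw [if_neg hk]
          have hcondf : ¬ ((PySem.Dict.contains (PySem.Dict.mk ctb) (simpleNamePy b)
              && !(PySem.Set.contains v (simpleNamePy b))) = true) := by
            simp [hk]
          rw [if_neg hcondf]
          exact ih stack v h
  | succ m ihm =>
    intro bases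
    induction bases with
    | nil => intro stack v _; simp only [runB, loopA]
    | cons b bs ih =>
      intro stack v h
      simp only [runB, loopA]
      by_cases he : PySem.Str.endswith (simpleNamePy b) "PreTrainedModel" = true
      · rw [if_pos he, if_pos he]
      · rw [if_neg he, if_neg he]
        by_cases hk : PySem.Dict.contains (PySem.Dict.mk ctb) (simpleNamePy b) = true
        · rw [if_pos hk]
          by_cases hv : PySem.Set.contains v (simpleNamePy b) = true
          · have hvm : simpleNamePy b ∈ v := by simpa [PySem.Set.contains] using hv
            have hcondf : ¬ ((PySem.Dict.contains (PySem.Dict.mk ctb) (simpleNamePy b)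
                && !(PySem.Set.contains v (simpleNamePy b))) = true) := by
              simp [hvm]
            rw [if_neg hcondf, goA_visited ctb (m + 1) _ v hv]
            exact ih stack v h
          · -- push: descend into the fresh node on both sides
            have hvf : PySem.Set.contains v (simpleNamePy b) = false := by simpa using hv
            have hcondt : (PySem.Dict.contains (PySem.Dict.mk ctb) (simpleNamePy b)
                && !(PySem.Set.contains v (simpleNamePy b))) = true := by
              rw [hk, hvf]; rfl
            rw [if_pos hcondt]
            have hlt := keyCount_add_lt ctb v (simpleNamePy b)
              (dictContains_exists ctb _ hk) (by simpa [PySem.Set.contains] using hv)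
            have h' : keyCount ctb (PySem.Set.add v (simpleNamePy b)) ≤ m := by omega
            have hgo : goA ctb (m + 1) (simpleNamePy b) v
                = loopA ctb m (PySem.Dict.getD (PySem.Dict.mk ctb) (simpleNamePy b) [])
                    (PySem.Set.add v (simpleNamePy b)) := by
              simp only [goA]; rw [if_neg hv]
            rw [hgo,
              ihm (PySem.Dict.getD (PySem.Dict.mk ctb) (simpleNamePy b) []) (bs :: stack)
                (PySem.Set.add v (simpleNamePy b)) h']
            rcases hres : loopA ctb m (PySem.Dict.getD (PySem.Dict.mk ctb) (simpleNamePy b) [])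
                (PySem.Set.add v (simpleNamePy b)) with ⟨br, v'⟩
            cases br
            · -- inner loop returned False with visiting v'; continue this level on bs
              have hsub : ∀ k, k ∈ v → k ∈ v' := by
                intro k hk'
                have := loopA_mem ctb m
                  (PySem.Dict.getD (PySem.Dict.mk ctb) (simpleNamePy b) [])
                  (PySem.Set.add v (simpleNamePy b)) k
                  ((PySem.Set.mem_add v (simpleNamePy b) k).mpr (Or.inl hk'))
                rwa [hres] at this
              have h'' : keyCount ctb v' ≤ m + 1 :=
                le_trans (keyCount_mono ctb v v' hsub) h
              exact ih stack v' h''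
            · rfl
        · rw [if_neg hk]
          have hcondf : ¬ ((PySem.Dict.contains (PySem.Dict.mk ctb) (simpleNamePy b)
              && !(PySem.Set.contains v (simpleNamePy b))) = true) := by
            simp [hk]
          rw [if_neg hcondf]
          exact ih stack v h

-- ===== VERDICT (by name: the statement is the Claim_ definition above) =====
theorem inherits_pretrained_model_py_spec : Claim_equal_inherits_pretrained_model_py := by
  intro class_name class_to_bases visiting _
  unfold Spec_inherits_pretrained_model_py inherits_pretrained_model_py
    inherits_pretrained_model_py_alt
  by_cases hc : PySem.Set.contains (visiting.getD []) class_name = true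
  · rw [if_pos hc]
    have : goA class_to_bases (class_to_bases.length + 2) class_name (visiting.getD [])
        = (false, visiting.getD []) := goA_visited _ _ _ _ hc
    rw [this]
  · rw [if_neg hc]
    have hKC : keyCount class_to_bases (PySem.Set.add (visiting.getD []) class_name)
        ≤ class_to_bases.length + 1 := by
      have h1 : keyCount class_to_bases (PySem.Set.add (visiting.getD []) class_name)
          ≤ class_to_bases.length := by
        simpa [keyCount] using
          List.length_filter_le
            (fun p : String × List String =>
              decide (p.1 ∉ PySem.Set.add (visiting.getD []) class_name)) class_to_bases
      omega
    have hgo : goA class_to_bases (class_to_bases.length + 2) class_name (visiting.getD [])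
        = loopA class_to_bases (class_to_bases.length + 1)
            (PySem.Dict.getD (PySem.Dict.mk class_to_bases) class_name [])
            (PySem.Set.add (visiting.getD []) class_name) := by
      show goA class_to_bases (Nat.succ (class_to_bases.length + 1)) _ _ = _
      simp only [goA]; rw [if_neg hc]
    rw [hgo,
      simBA class_to_bases (class_to_bases.length + 1)
        (PySem.Dict.getD (PySem.Dict.mk class_to_bases) class_name [])
        [] (PySem.Set.add (visiting.getD []) class_name) hKC]
    rcases loopA class_to_bases (class_to_bases.length + 1)
        (PySem.Dict.getD (PySem.Dict.mk class_to_bases) class_name [])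
        (PySem.Set.add (visiting.getD []) class_name) with ⟨br, v'⟩
    cases br
    · simp only [runB]
    · rfl
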